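-- pv_equiv track=rewrite | github.com/sgagnonboncode/aoc2023 | src/solvers/day03.py | extract_neighbors
-- ===== SOURCE A (Python) =====
-- def extract_neighbors(numbers: list[int, int], i, same_line: bool = False):
--     neighbour_range = [-1, 1] if same_line else [-1, 0, 1]
--     neighbours = []
--
--     for index, number in numbers:
--         number_size = len(str(number))
--
--         for k in range(0, number_size):
--             dist = i - (index + k)
--             if dist in neighbour_range:
--                 neighbours.append(number)
--                 break
--     return neighbours
-- ===== SOURCE B (Python) =====
-- def extract_neighbors(numbers: list[int, int], i, same_line: bool = False):
--     # Interval-overlap test instead of scanning every digit position: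
--     # the number occupies [start, end]; it is a neighbour of i iff that span
--     # touches [i-1, i+1], excluding (when same_line) the span being exactly {i}.
--     def near(start, end):
--         return start <= i + 1 and end >= i - 1 and not (same_line and start == i and end == i)
--
--     return [n for start, n in numbers if near(start, start + len(str(n)) - 1)]
-- ===== Notes on version B (the rewrite author's own statement) =====
-- stated objective: simpler
-- what changed: Replaces the inner per-digit-position scan (with break) by a single O(1) interval-overlap test per number, and the accumulator loop by a list comprehension.
import Mathlib
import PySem

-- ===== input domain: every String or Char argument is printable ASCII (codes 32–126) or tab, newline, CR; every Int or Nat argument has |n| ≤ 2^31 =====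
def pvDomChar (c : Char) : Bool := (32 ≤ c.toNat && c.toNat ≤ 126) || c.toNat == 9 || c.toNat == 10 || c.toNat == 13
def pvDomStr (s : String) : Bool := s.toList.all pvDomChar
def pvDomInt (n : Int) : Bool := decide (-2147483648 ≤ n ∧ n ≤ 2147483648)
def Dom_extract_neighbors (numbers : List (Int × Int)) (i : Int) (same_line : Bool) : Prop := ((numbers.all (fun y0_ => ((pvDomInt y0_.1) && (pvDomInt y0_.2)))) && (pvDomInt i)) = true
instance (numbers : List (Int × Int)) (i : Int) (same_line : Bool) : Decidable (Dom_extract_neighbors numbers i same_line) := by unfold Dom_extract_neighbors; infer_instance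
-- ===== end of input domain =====

-- B replaces A's per-digit-position inner scan by one interval-overlap test per number (simpler, same output).
-- ===== PORT A =====
-- inner `for k in range(0, number_size): ... if dist in neighbour_range: append; break`
def pvInnerHit (ks : List Int) (i index : Int) (nr : List Int) : Bool :=
  match ks with
  | [] => false
  | k :: rest =>
    if nr.contains (i - (index + k)) then true else pvInnerHit rest i index nr

def extract_neighbors (numbers : List (Int × Int)) (i : Int) (same_line : Bool) : List Int :=
  let neighbour_range : List Int := if same_line then [-1, 1] else [-1, 0, 1]
  numbers.foldl (fun neighbours p =>
    let number_size : Int := PySem.Str.len (PySem.Int.toStr p.2)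
    if pvInnerHit (PySem.List.pyRange 0 number_size 1) i p.1 neighbour_range then
      neighbours ++ [p.2]
    else
      neighbours) []

-- ===== PORT B =====
def pvNear (i : Int) (same_line : Bool) (start fin : Int) : Bool :=
  start ≤ i + 1 && fin ≥ i - 1 && !(same_line && start == i && fin == i)

def extract_neighbors_alt (numbers : List (Int × Int)) (i : Int) (same_line : Bool) : List Int :=
  (numbers.filter (fun p =>
      pvNear i same_line p.1 (p.1 + PySem.Str.len (PySem.Int.toStr p.2) - 1))).map Prod.snd

-- ===== PRECONDITION & SPEC =====
def Spec_extract_neighbors (numbers : List (Int × Int)) (i : Int) (same_line : Bool) (out : List Int) : Prop := out = extract_neighbors_alt numbers i same_line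
instance (numbers : List (Int × Int)) (i : Int) (same_line : Bool) (out : List Int) : Decidable (Spec_extract_neighbors numbers i same_line out) := by unfold Spec_extract_neighbors; infer_instance

-- ===== CLAIM (what is proved, stated in full; the proofs are below) =====
def Claim_equal_extract_neighbors : Prop := ∀ (numbers : List (Int × Int)) (i : Int) (same_line : Bool), Dom_extract_neighbors numbers i same_line → Spec_extract_neighbors numbers i same_line (extract_neighbors numbers i same_line)

-- ===== LEMMAS AND PROOFS =====

theorem pvToDigitsCore_len_ge (b : Nat) : ∀ (f n : Nat) (l : List Char), l.length ≤ (Nat.toDigitsCore b f n l).length := by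
  intro f
  induction f with
  | zero => intro n l; simp [Nat.toDigitsCore]
  | succ f ih =>
    intro n l
    simp only [Nat.toDigitsCore]
    split
    · simp
    · calc l.length ≤ (Nat.digitChar (n % b) :: l).length := by simp
        _ ≤ _ := ih _ _

theorem pvToChars_len_pos (n : Int) : 1 ≤ (PySem.Int.toChars n).length := by
  unfold PySem.Int.toChars
  split
  · simp
  · show 1 ≤ (Nat.toDigits 10 _).length
    unfold Nat.toDigits
    simp only [Nat.toDigitsCore]
    split
    · simp
    · calc (1:Nat) = [Nat.digitChar (n.toNat % 10)].length := by simp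
        _ ≤ _ := pvToDigitsCore_len_ge _ _ _ _

-- str(n) is never empty
theorem pvSize_pos (n : Int) : (1:Int) ≤ PySem.Str.len (PySem.Int.toStr n) := by
  have h := pvToChars_len_pos n
  rw [← PySem.Int.toList_toStr] at h
  simp only [PySem.Str.len_eq]
  omega

-- the break-on-first-hit inner loop is List.any
theorem pvInnerHit_eq_any (ks : List Int) (i index : Int) (nr : List Int) :
    pvInnerHit ks i index nr = ks.any (fun k => nr.contains (i - (index + k))) := by
  induction ks with
  | nil => rfl
  | cons k rest ih =>
    simp only [pvInnerHit, List.any_cons]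
    split <;> simp_all

-- the digit-position scan over [0, s) equals the interval-overlap test (for s ≥ 1)
theorem pvHit_iff (i index s : Int) (hs : (1:Int) ≤ s) (sl : Bool) :
    pvInnerHit (PySem.List.pyRange 0 s 1) i index (if sl then [-1, 1] else [-1, 0, 1])
      = pvNear i sl index (index + s - 1) := by
  rw [pvInnerHit_eq_any, Bool.eq_iff_iff]
  cases sl
  · simp only [Bool.false_eq_true, ite_false]
    simp [List.any_eq_true, PySem.List.mem_pyRange_one, pvNear]
    constructor
    · rintro ⟨k, ⟨hk0, hks⟩, hd⟩
      exact ⟨by omega, by omega⟩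
    · rintro ⟨h1, h2⟩
      by_cases h : i - 1 ≤ index
      · exact ⟨0, ⟨by omega, by omega⟩, by omega⟩
      · exact ⟨i - 1 - index, ⟨by omega, by omega⟩, by omega⟩
  · simp only [ite_true]
    simp [List.any_eq_true, PySem.List.mem_pyRange_one, pvNear]
    constructor
    · rintro ⟨k, ⟨hk0, hks⟩, hd⟩
      exact ⟨⟨by omega, by omega⟩, by omega⟩
    · rintro ⟨⟨h1, h2⟩, h3⟩
      by_cases h : index ≤ i - 1 ∧ i - 1 ≤ index + s - 1
      · exact ⟨i - 1 - index, ⟨by omega, by omega⟩, by omega⟩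
      · exact ⟨i + 1 - index, ⟨by omega, by omega⟩, by omega⟩

-- A's fold with an arbitrary accumulator versus B's filter-map
theorem pvFold_eq (i : Int) (sl : Bool) : ∀ (numbers : List (Int × Int)) (acc : List Int),
    numbers.foldl (fun neighbours p =>
        if pvInnerHit (PySem.List.pyRange 0 (PySem.Str.len (PySem.Int.toStr p.2)) 1) i p.1
            (if sl then [-1, 1] else [-1, 0, 1]) then neighbours ++ [p.2] else neighbours) acc
      = acc ++ extract_neighbors_alt numbers i sl := by
  intro numbers
  induction numbers with
  | nil => intro acc; simp [extract_neighbors_alt]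
  | cons p rest ih =>
    intro acc
    simp only [List.foldl_cons]
    rw [pvHit_iff i p.1 _ (pvSize_pos p.2) sl]
    by_cases h : pvNear i sl p.1 (p.1 + PySem.Str.len (PySem.Int.toStr p.2) - 1) = true
    · rw [if_pos h, ih]
      simp only [extract_neighbors_alt, List.filter_cons]
      rw [if_pos h]
      simp only [List.map_cons, List.append_assoc, List.singleton_append]
    · rw [if_neg h, ih]
      simp only [extract_neighbors_alt, List.filter_cons]
      rw [if_neg h]

-- ===== VERDICT (by name: the statement is the Claim_ definition above) =====
theorem extract_neighbors_spec : Claim_equal_extract_neighbors := by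
  intro numbers i sl _
  unfold Spec_extract_neighbors
  simp only [extract_neighbors]
  rw [pvFold_eq i sl numbers []]
  simp
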